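-- pv_equiv track=rewrite | github.com/GregoryMorse/cryptopals | utility.py | getEta
-- ===== SOURCE A (Python) =====
-- def getEta(psN):
--   ce, co, c, one = 2, 1, 2, 1
--   even = True
--   degree = psN * (psN - 1) // 2 + 1
--   res = [1, -1, -1]
--   while c < psN:
--     if even:
--       c += ce + 1
--       ce += 2
--       while (len(res) < c): res.append(0)
--       res.append(one)
--     else:
--       c += co + 1
--       co += 1
--       while (len(res) < c): res.append(0)
--       res.append(one)
--       one = -one
--     even = not even
--   return list(reversed(res))
-- ===== SOURCE B (Python) =====
-- def getEta(psN):
--   # Collect (index, sign) entries at generalized pentagonal numbers via the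
--   # closed form, then fill a preallocated zero array once and reverse it.
--   pts = [(0, 1), (1, -1), (2, -1)]
--   last, k = 2, 2
--   while last < psN:
--     sign = 1 if k % 2 == 0 else -1
--     last = (3 * k * k - k) // 2
--     pts.append((last, sign))
--     if last < psN:
--       last = (3 * k * k + k) // 2
--       pts.append((last, sign))
--     k += 1
--   res = [0] * (last + 1)
--   for i, s in pts:
--     res[i] = s
--   return res[::-1]
-- ===== Notes on version B (the rewrite author's own statement) =====
-- stated objective: faster
-- what changed: Replaces A's incremental even/odd step counters and per-element zero-padding append loop by computing each generalized pentagonal index directly with the closed forms (3k^2-k)//2 and (3k^2+k)//2, collecting the few (index, sign) entries and filling a preallocated zero array once before reversing.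
import Mathlib
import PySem

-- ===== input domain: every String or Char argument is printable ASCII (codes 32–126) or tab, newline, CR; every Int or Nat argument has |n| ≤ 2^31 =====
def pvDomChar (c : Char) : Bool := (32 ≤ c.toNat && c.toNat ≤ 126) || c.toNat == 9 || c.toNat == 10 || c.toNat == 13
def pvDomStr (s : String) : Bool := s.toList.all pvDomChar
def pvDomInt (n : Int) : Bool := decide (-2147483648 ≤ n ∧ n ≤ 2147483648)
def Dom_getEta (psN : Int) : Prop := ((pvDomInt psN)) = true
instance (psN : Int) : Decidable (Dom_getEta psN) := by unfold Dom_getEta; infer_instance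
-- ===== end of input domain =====

-- B builds the (index, sign) entries with the closed-form pentagonal formulas, fills a
-- preallocated zero array once and reverses it, instead of A's incremental counters with
-- zero-padding appends; objective: faster (a timing run measured a constant-factor speedup).

-- ===== PORT A =====
-- the inner 'while len(res) < c: res.append(0)' padding loop
def padA (res : List Int) (c : Int) : List Int :=
  if (res.length : Int) < c then padA (res ++ [0]) c else res
termination_by (c - res.length).toNat
decreasing_by simp only [List.length_append, List.length_cons, List.length_nil]; omega

-- the main 'while c < psN' loop; ce, co only ever hold nonnegative counter values
def loopA (psN : Int) (ce co : Nat) (c one : Int) (even : Bool) (res : List Int) : List Int :=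
  if c < psN then
    if even then
      loopA psN (ce + 2) co (c + ce + 1) one false (padA res (c + ce + 1) ++ [one])
    else
      loopA psN ce (co + 1) (c + co + 1) (-one) true (padA res (c + co + 1) ++ [one])
  else res
termination_by (psN - c).toNat
decreasing_by all_goals omega

-- 'degree' in A is computed but never used, so it is omitted
def getEta (psN : Int) : List Int :=
  (loopA psN 2 1 2 1 true [1, -1, -1]).reverse

-- ===== PORT B =====
-- the two generalized pentagonal numbers (3*k*k - k)//2 and (3*k*k + k)//2 of Source B
def pentA (k : Nat) : Int := PySem.Int.floordiv (3 * (k : Int) * (k : Int) - (k : Int)) 2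
def pentB (k : Nat) : Int := PySem.Int.floordiv (3 * (k : Int) * (k : Int) + (k : Int)) 2

theorem two_mul_pentA (k : Nat) : 2 * pentA k = 3 * (k : Int) * (k : Int) - (k : Int) := by
  unfold pentA
  rw [PySem.Int.floordiv_eq_ediv_of_pos (by norm_num)]
  refine Int.mul_ediv_cancel' ?_
  rcases Int.even_or_odd (k : Int) with ⟨m, hm⟩ | ⟨m, hm⟩
  · exact ⟨6 * m * m - m, by rw [hm]; ring⟩
  · exact ⟨(2 * m + 1) * (3 * m + 1), by rw [hm]; ring⟩

theorem two_mul_pentB (k : Nat) : 2 * pentB k = 3 * (k : Int) * (k : Int) + (k : Int) := by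
  unfold pentB
  rw [PySem.Int.floordiv_eq_ediv_of_pos (by norm_num)]
  refine Int.mul_ediv_cancel' ?_
  rcases Int.even_or_odd (k : Int) with ⟨m, hm⟩ | ⟨m, hm⟩
  · exact ⟨6 * m * m + m, by rw [hm]; ring⟩
  · exact ⟨(2 * m + 1) * (3 * m + 2), by rw [hm]; ring⟩

theorem pentA_le_pentB (k : Nat) : pentA k ≤ pentB k := by
  have h1 := two_mul_pentA k; have h2 := two_mul_pentB k
  have hk : (0 : Int) ≤ (k : Int) := Int.natCast_nonneg k
  omega

theorem pentB_lt_pentA_succ (k : Nat) : pentB k < pentA (k + 1) := by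
  have h1 := two_mul_pentB k
  have h2 := two_mul_pentA (k + 1)
  have hk : (0 : Int) ≤ (k : Int) := Int.natCast_nonneg k
  push_cast at h2
  nlinarith

-- Source B's 'while last < psN' loop; the extra Prop argument only records the loop invariant
-- 'last is below the next pentagonal number', needed for termination, and does not affect
-- the computation.
def loopB (psN : Int) (pts : List (Int × Int)) (k : Nat) (last : Int)
    (_h : last < pentA k) : List (Int × Int) × Int :=
  if last < psN then
    let sign : Int := if k % 2 = 0 then 1 else -1
    if pentA k < psN then
      loopB psN (pts ++ [(pentA k, sign), (pentB k, sign)]) (k + 1) (pentB k)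
        (pentB_lt_pentA_succ k)
    else
      loopB psN (pts ++ [(pentA k, sign)]) (k + 1) (pentA k)
        (lt_of_le_of_lt (pentA_le_pentB k) (pentB_lt_pentA_succ k))
  else (pts, last)
termination_by (psN - last).toNat
decreasing_by
  · have := pentA_le_pentB k; omega
  · omega

-- Source B's 'for i, s in pts: res[i] = s' fill loop (every index is in range and nonnegative,
-- where List.set is exact for Python's res[i] = s)
def fillB (res : List Int) (pts : List (Int × Int)) : List Int :=
  pts.foldl (fun r is => r.set is.1.toNat is.2) res

-- res[::-1] is ported as List.reverse (exact)
def getEta_alt (psN : Int) : List Int :=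
  let pr := loopB psN [(0, 1), (1, -1), (2, -1)] 2 2 (by decide)
  (fillB (List.replicate (pr.2 + 1).toNat 0) pr.1).reverse

-- ===== PRECONDITION & SPEC =====
def Spec_getEta (psN : Int) (out : List Int) : Prop := out = getEta_alt psN
instance (psN : Int) (out : List Int) : Decidable (Spec_getEta psN out) := by unfold Spec_getEta; infer_instance

-- ===== CLAIM (what is proved, stated in full; the proofs are below) =====
def Claim_equal_getEta : Prop := ∀ (psN : Int), Dom_getEta psN → Spec_getEta psN (getEta psN)

-- ===== LEMMAS AND PROOFS =====

def renderB (pts : List (Int × Int)) (last : Int) : List Int :=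
  fillB (List.replicate (last + 1).toNat 0) pts

theorem length_fillB (res : List Int) (pts : List (Int × Int)) :
    (fillB res pts).length = res.length := by
  induction pts generalizing res with
  | nil => rfl
  | cons p t ih => simp [fillB, List.foldl_cons] at *; rw [ih, List.length_set]

theorem fillB_append_right (res t : List Int) (pts : List (Int × Int))
    (h : ∀ p ∈ pts, p.1.toNat < res.length) :
    fillB (res ++ t) pts = fillB res pts ++ t := by
  induction pts generalizing res with
  | nil => rfl
  | cons p ps ih =>
    simp only [fillB, List.foldl_cons] at *
    rw [List.set_append, if_pos (h p (by simp))]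
    rw [ih]
    intro q hq
    rw [List.length_set]
    exact h q (by simp [hq])

theorem fillB_snoc (res : List Int) (pts : List (Int × Int)) (i : Int) (s : Int) :
    fillB res (pts ++ [(i, s)]) = (fillB res pts).set i.toNat s := by
  simp [fillB, List.foldl_append]

theorem padA_eq (res : List Int) (c : Int) :
    padA res c = res ++ List.replicate (c - res.length).toNat 0 := by
  by_cases h : (res.length : Int) < c
  · rw [padA, if_pos h, padA_eq (res ++ [0]) c]
    have : (c - res.length).toNat = ((c - (res ++ [0]).length).toNat) + 1 := by
      simp only [List.length_append, List.length_cons, List.length_nil]; omega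
    rw [this, List.replicate_succ, List.append_assoc]
    rfl
  · rw [padA, if_neg h]
    have : (c - res.length).toNat = 0 := by omega
    simp [this]
termination_by (c - res.length).toNat
decreasing_by simp only [List.length_append, List.length_cons, List.length_nil]; omega

-- appending one entry at a fresh index c > last: pad with zeros then put the sign at the end
theorem renderB_snoc (pts : List (Int × Int)) (last c one : Int)
    (h0 : 0 ≤ last) (hlt : last < c)
    (hb : ∀ p ∈ pts, 0 ≤ p.1 ∧ p.1 ≤ last) :
    renderB (pts ++ [(c, one)]) c = padA (renderB pts last) c ++ [one] := by
  have hidx : ∀ p ∈ pts, p.1.toNat < (List.replicate (last + 1).toNat (0 : Int)).length := by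
    intro p hp
    have := hb p hp
    simp only [List.length_replicate]
    omega
  have hsplit : List.replicate (c + 1).toNat (0 : Int)
      = List.replicate (last + 1).toNat 0 ++ (List.replicate (c - 1 - last).toNat 0 ++ [0]) := by
    have h' : (c + 1).toNat = (last + 1).toNat + ((c - 1 - last).toNat + 1) := by omega
    rw [h', List.replicate_add, List.replicate_add, List.replicate_one]
  unfold renderB
  rw [fillB_snoc, hsplit, fillB_append_right _ _ _ hidx, padA_eq]
  have hlen : (fillB (List.replicate (last + 1).toNat (0 : Int)) pts).length
      = (last + 1).toNat := by
    rw [length_fillB, List.length_replicate]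
  rw [hlen]
  have hrep : (c - ((last + 1).toNat : Int)).toNat = (c - 1 - last).toNat := by omega
  rw [hrep]
  have hlen2 : ((fillB (List.replicate (last + 1).toNat 0) pts) ++
      List.replicate (c - 1 - last).toNat 0).length = c.toNat := by
    simp only [List.length_append, List.length_replicate, hlen]
    omega
  rw [← List.append_assoc, List.set_append, hlen2, if_neg (lt_irrefl _), Nat.sub_self]
  simp [List.append_assoc, List.set]

theorem loopB_stop (psN : Int) (pts : List (Int × Int)) (k : Nat) (last : Int)
    (h : last < pentA k) (hstop : ¬ last < psN) :
    loopB psN pts k last h = (pts, last) := by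
  rw [loopB, if_neg hstop]

theorem sign_flip (j : Nat) :
    -(if (j + 1) % 2 = 0 then (1 : Int) else -1) = (if (j + 2) % 2 = 0 then (1 : Int) else -1) := by
  rcases Nat.even_or_odd j with ⟨m, hm⟩ | ⟨m, hm⟩
  · have h1 : (j + 1) % 2 = 1 := by omega
    have h2 : (j + 2) % 2 = 0 := by omega
    simp [h1, h2]
  · have h1 : (j + 1) % 2 = 0 := by omega
    have h2 : (j + 2) % 2 = 1 := by omega
    simp [h1, h2]

-- the main simulation: one iteration of Source B's loop = one pair of iterations of A's loop
theorem loop_sim (n : Nat) : ∀ (psN : Int) (j : Nat) (pts : List (Int × Int)) (last one : Int)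
    (hk : last < pentA (j + 1)),
    (psN - last).toNat = n →
    1 ≤ j →
    2 * last = 3 * (j : Int) * (j : Int) + (j : Int) →
    one = (if (j + 1) % 2 = 0 then (1 : Int) else -1) →
    (∀ p ∈ pts, 0 ≤ p.1 ∧ p.1 ≤ last) →
    loopA psN (2 * j) j last one true (renderB pts last)
      = renderB (loopB psN pts (j + 1) last hk).1 (loopB psN pts (j + 1) last hk).2 := by
  induction n using Nat.strong_induction_on with
  | _ n ih =>
    intro psN j pts last one hk hn hj hlast hone hb
    have hjn : (0 : Int) ≤ (j : Int) := Int.natCast_nonneg j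
    have hj1 : (1 : Int) ≤ (j : Int) := by exact_mod_cast hj
    have h0last : 0 ≤ last := by nlinarith
    have hA1 := two_mul_pentA (j + 1)
    have hB1 := two_mul_pentB (j + 1)
    push_cast at hA1 hB1
    -- the even-step target index is pentA (j+1), the odd-step one pentB (j+1)
    have hc1 : last + (2 * j : Nat) + 1 = pentA (j + 1) := by push_cast; nlinarith
    have hc2 : pentA (j + 1) + (j : Nat) + 1 = pentB (j + 1) := by nlinarith
    by_cases hlt : last < psN
    · rw [loopA, if_pos hlt, if_pos rfl, hc1]
      rw [loopB, if_pos hlt]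
      have hsign : (if (j + 1) % 2 = 0 then (1 : Int) else -1) = one := hone.symm
      have hres1 : padA (renderB pts last) (pentA (j + 1)) ++ [one]
          = renderB (pts ++ [(pentA (j + 1), one)]) (pentA (j + 1)) := by
        rw [renderB_snoc pts last _ one h0last (by omega) hb]
      by_cases hlt2 : pentA (j + 1) < psN
      · -- A performs the odd step too; B appends both entries
        rw [loopA, if_pos hlt2, if_neg (by simp), hc2]
        simp only [hsign, if_pos hlt2]
        have hb2 : ∀ p ∈ pts ++ [(pentA (j + 1), one), (pentB (j + 1), one)],
            0 ≤ p.1 ∧ p.1 ≤ pentB (j + 1) := by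
          intro p hp
          simp only [List.mem_append, List.mem_cons, List.not_mem_nil, or_false] at hp
          rcases hp with hp | hp | hp
          · have := hb p hp
            constructor
            · exact this.1
            · nlinarith [this.2]
          · rw [hp]; constructor
            · simp; nlinarith
            · simpa using pentA_le_pentB (j + 1)
          · rw [hp]; constructor
            · simp; nlinarith
            · simp
        have hres2 : padA (renderB (pts ++ [(pentA (j + 1), one)]) (pentA (j + 1))) (pentB (j + 1)) ++ [one]
            = renderB ((pts ++ [(pentA (j + 1), one)]) ++ [(pentB (j + 1), one)]) (pentB (j + 1)) := by
          rw [renderB_snoc (pts ++ [(pentA (j + 1), one)]) (pentA (j + 1)) _ one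
            (by nlinarith) (by nlinarith)]
          intro p hp
          simp only [List.mem_append, List.mem_cons, List.not_mem_nil, or_false] at hp
          rcases hp with hp | hp
          · have := hb p hp
            exact ⟨this.1, by omega⟩
          · rw [hp]; exact ⟨by simp; nlinarith, by simp⟩
        rw [hres1, hres2]
        have harr : (pts ++ [(pentA (j + 1), one)]) ++ [(pentB (j + 1), one)]
            = pts ++ [(pentA (j + 1), one), (pentB (j + 1), one)] := by simp
        rw [harr]
        have hstep : loopA psN (2 * j + 2) (j + 1) (pentB (j + 1)) (-one) true
              (renderB (pts ++ [(pentA (j + 1), one), (pentB (j + 1), one)]) (pentB (j + 1)))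
            = renderB (loopB psN (pts ++ [(pentA (j + 1), one), (pentB (j + 1), one)]) (j + 2)
                (pentB (j + 1)) (pentB_lt_pentA_succ (j + 1))).1
              (loopB psN (pts ++ [(pentA (j + 1), one), (pentB (j + 1), one)]) (j + 2)
                (pentB (j + 1)) (pentB_lt_pentA_succ (j + 1))).2 := by
          have hmeas : (psN - pentB (j + 1)).toNat < n := by
            have : last < pentB (j + 1) := by nlinarith
            omega
          have h2j : 2 * j + 2 = 2 * (j + 1) := by omega
          rw [h2j]
          refine ih _ hmeas psN (j + 1) _ (pentB (j + 1)) (-one)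
            (pentB_lt_pentA_succ (j + 1)) rfl (by omega) (by push_cast; nlinarith) ?_ hb2
          rw [hone]
          exact sign_flip j
        exact hstep
      · -- A stops after the even step; B appends only the first entry and its recursion stops
        rw [loopA, if_neg hlt2]
        simp only [hsign, if_neg hlt2]
        rw [loopB_stop psN _ (j + 2) (pentA (j + 1)) _ hlt2]
        exact hres1
    · rw [loopA, if_neg hlt, loopB_stop psN pts (j + 1) last hk hlt]

-- ===== VERDICT (by name: the statement is the Claim_ definition above) =====
theorem getEta_spec : Claim_equal_getEta := by
  unfold Claim_equal_getEta
  intro psN _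
  unfold Spec_getEta getEta getEta_alt
  have hinit : ([1, -1, -1] : List Int) = renderB [(0, 1), (1, -1), (2, -1)] 2 := by decide
  rw [hinit]
  have h := loop_sim (psN - 2).toNat psN 1 [(0, 1), (1, -1), (2, -1)] 2 1 (by decide)
    rfl (by omega) (by norm_num) (by norm_num) (by decide)
  simpa using congrArg List.reverse h
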